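-- pv_equiv track=rewrite | github.com/SantiiagoSanchez/Logica-python | 11-Batman-Day.py | sumar_zona_grid_alertas
-- ===== SOURCE A (Python) =====
-- def sumar_zona_grid_alertas(sensors, center_x, center_y) -> int:
--     total = 0
--
--     for x in range(center_x - 1, center_x + 2):
--         for y in range(center_y - 1, center_y + 2):
--             for sensor in sensors:
--                 if sensor[0] == x and sensor[1] == y:
--                     total += sensor[2]
--
--     return total
-- ===== SOURCE B (Python) =====
-- def sumar_zona_grid_alertas(sensors, center_x, center_y) -> int:
--     return sum(s[2] for s in sensors
--                if abs(s[0] - center_x) <= 1 and abs(s[1] - center_y) <= 1)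
-- ===== Notes on version B (the rewrite author's own statement) =====
-- stated objective: simpler
-- what changed: Replaced the three nested loops (9 grid cells x all sensors, matched by coordinate equality) with a single pass over sensors using an abs-difference bounds test.
import Mathlib
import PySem

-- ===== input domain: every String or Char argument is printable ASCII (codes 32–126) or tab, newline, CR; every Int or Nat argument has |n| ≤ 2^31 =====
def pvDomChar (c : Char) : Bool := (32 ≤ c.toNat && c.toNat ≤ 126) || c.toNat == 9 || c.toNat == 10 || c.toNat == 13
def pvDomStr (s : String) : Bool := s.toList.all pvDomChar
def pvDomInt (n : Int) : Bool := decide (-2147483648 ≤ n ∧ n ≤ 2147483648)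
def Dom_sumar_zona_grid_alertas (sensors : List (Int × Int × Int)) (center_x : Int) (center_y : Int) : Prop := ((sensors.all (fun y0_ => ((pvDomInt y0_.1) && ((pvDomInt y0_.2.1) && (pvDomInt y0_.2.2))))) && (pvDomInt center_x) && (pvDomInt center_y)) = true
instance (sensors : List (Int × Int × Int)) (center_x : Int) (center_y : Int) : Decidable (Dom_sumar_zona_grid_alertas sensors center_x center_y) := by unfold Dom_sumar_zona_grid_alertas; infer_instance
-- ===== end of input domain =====

-- ===== PORT A =====
-- literal transliteration of A: three nested loops (x over range(cx-1,cx+2), y over range(cy-1,cy+2), sensors)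
def sumar_zona_grid_alertas (sensors : List (Int × Int × Int)) (center_x : Int) (center_y : Int) : Int :=
  (PySem.List.pyRange (center_x - 1) (center_x + 2) 1).foldl (fun total x =>
    (PySem.List.pyRange (center_y - 1) (center_y + 2) 1).foldl (fun total y =>
      sensors.foldl (fun total sensor =>
        if sensor.1 = x ∧ sensor.2.1 = y then total + sensor.2.2 else total) total) total) 0

-- ===== PORT B =====
-- B: one pass over sensors, summing values of sensors inside the 3x3 box (abs-difference test)
def sumar_zona_grid_alertas_alt (sensors : List (Int × Int × Int)) (center_x : Int) (center_y : Int) : Int :=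
  ((sensors.filter (fun s => |s.1 - center_x| ≤ 1 ∧ |s.2.1 - center_y| ≤ 1)).map (fun s => s.2.2)).sum

-- ===== PRECONDITION & SPEC =====
def Spec_sumar_zona_grid_alertas (sensors : List (Int × Int × Int)) (center_x : Int) (center_y : Int) (out : Int) : Prop := out = sumar_zona_grid_alertas_alt sensors center_x center_y
instance (sensors : List (Int × Int × Int)) (center_x : Int) (center_y : Int) (out : Int) : Decidable (Spec_sumar_zona_grid_alertas sensors center_x center_y out) := by unfold Spec_sumar_zona_grid_alertas; infer_instance

-- ===== CLAIM =====
def Claim_equal_sumar_zona_grid_alertas : Prop := ∀ (sensors : List (Int × Int × Int)) (center_x : Int) (center_y : Int), Dom_sumar_zona_grid_alertas sensors center_x center_y → Spec_sumar_zona_grid_alertas sensors center_x center_y (sumar_zona_grid_alertas sensors center_x center_y)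

-- ===== LEMMAS AND PROOFS =====

def pvCellSum (sensors : List (Int × Int × Int)) (x y : Int) : Int :=
  sensors.foldl (fun total sensor =>
    if sensor.1 = x ∧ sensor.2.1 = y then total + sensor.2.2 else total) 0

theorem pvCellSum_shift (sensors : List (Int × Int × Int)) (x y t : Int) :
    sensors.foldl (fun total sensor =>
      if sensor.1 = x ∧ sensor.2.1 = y then total + sensor.2.2 else total) t
    = t + pvCellSum sensors x y := by
  induction sensors generalizing t with
  | nil => simp [pvCellSum]
  | cons s rest ih =>
      simp only [pvCellSum, List.foldl_cons]
      rw [ih, ih]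
      split_ifs <;> ring

theorem pvRange3 (a : Int) : PySem.List.pyRange (a - 1) (a + 2) 1 = [a - 1, a, a + 1] := by
  rw [PySem.List.pyRange_one]
  have h3 : (a + 2 - (a - 1)).toNat = 3 := by omega
  rw [h3]
  simp [List.range_succ]
  omega

theorem pvA_as_cells (sensors : List (Int × Int × Int)) (cx cy : Int) :
    sumar_zona_grid_alertas sensors cx cy
    = pvCellSum sensors (cx-1) (cy-1) + pvCellSum sensors (cx-1) cy + pvCellSum sensors (cx-1) (cy+1)
    + pvCellSum sensors cx (cy-1) + pvCellSum sensors cx cy + pvCellSum sensors cx (cy+1)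
    + pvCellSum sensors (cx+1) (cy-1) + pvCellSum sensors (cx+1) cy + pvCellSum sensors (cx+1) (cy+1) := by
  unfold sumar_zona_grid_alertas
  rw [pvRange3, pvRange3]
  simp only [List.foldl_cons, List.foldl_nil]
  rw [pvCellSum_shift, pvCellSum_shift, pvCellSum_shift, pvCellSum_shift, pvCellSum_shift,
      pvCellSum_shift, pvCellSum_shift, pvCellSum_shift, pvCellSum_shift]
  ring

theorem pvIndicator (s : Int × Int × Int) (cx cy : Int) :
    (if s.1 = cx-1 ∧ s.2.1 = cy-1 then s.2.2 else 0) + (if s.1 = cx-1 ∧ s.2.1 = cy then s.2.2 else 0)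
    + (if s.1 = cx-1 ∧ s.2.1 = cy+1 then s.2.2 else 0) + (if s.1 = cx ∧ s.2.1 = cy-1 then s.2.2 else 0)
    + (if s.1 = cx ∧ s.2.1 = cy then s.2.2 else 0) + (if s.1 = cx ∧ s.2.1 = cy+1 then s.2.2 else 0)
    + (if s.1 = cx+1 ∧ s.2.1 = cy-1 then s.2.2 else 0) + (if s.1 = cx+1 ∧ s.2.1 = cy then s.2.2 else 0)
    + (if s.1 = cx+1 ∧ s.2.1 = cy+1 then s.2.2 else 0)
    = (if |s.1 - cx| ≤ 1 ∧ |s.2.1 - cy| ≤ 1 then s.2.2 else 0) := by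
  rcases s with ⟨a, b, v⟩
  simp only [abs_le]
  split_ifs <;> omega

theorem pvCells_eq_alt (sensors : List (Int × Int × Int)) (cx cy : Int) :
    pvCellSum sensors (cx-1) (cy-1) + pvCellSum sensors (cx-1) cy + pvCellSum sensors (cx-1) (cy+1)
    + pvCellSum sensors cx (cy-1) + pvCellSum sensors cx cy + pvCellSum sensors cx (cy+1)
    + pvCellSum sensors (cx+1) (cy-1) + pvCellSum sensors (cx+1) cy + pvCellSum sensors (cx+1) (cy+1)
    = sumar_zona_grid_alertas_alt sensors cx cy := by
  induction sensors with
  | nil => simp [pvCellSum, sumar_zona_grid_alertas_alt]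
  | cons s rest ih =>
      have hs : ∀ x y : Int, pvCellSum (s :: rest) x y
          = (if s.1 = x ∧ s.2.1 = y then s.2.2 else 0) + pvCellSum rest x y := by
        intro x y
        simp only [pvCellSum, List.foldl_cons]
        rw [pvCellSum_shift]
        split_ifs <;> simp [pvCellSum]
      simp only [hs]
      have key := pvIndicator s cx cy
      unfold sumar_zona_grid_alertas_alt at *
      by_cases hb : |s.1 - cx| ≤ 1 ∧ |s.2.1 - cy| ≤ 1
      · rw [List.filter_cons_of_pos (by simpa using hb), List.map_cons, List.sum_cons, ← ih]
        rw [if_pos hb] at key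
        linarith [key]
      · rw [List.filter_cons_of_neg (by simpa using hb), ← ih]
        rw [if_neg hb] at key
        linarith [key]

-- ===== VERDICT =====
theorem sumar_zona_grid_alertas_spec : Claim_equal_sumar_zona_grid_alertas := by
  intro sensors cx cy _
  unfold Spec_sumar_zona_grid_alertas
  rw [pvA_as_cells, pvCells_eq_alt]
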